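-- pv_equiv track=rewrite | github.com/newkimjiwon/CodingTest | BAEKJOON/B2/8958번_OX퀴즈.py | solution
-- ===== SOURCE A (Python) =====
-- def solution(s):
--     answer = 0
--
--     # 현재 스코어
--     score = 0
--
--     for i in s:
--         if i == 'O':
--             score += 1
--             answer += score
--         else:
--             score = 0
--
--     return answer
-- ===== SOURCE B (Python) =====
-- def solution(s):
--     total = 0
--     i = 0
--     n = len(s)
--     while i < n:
--         if s[i] == 'O':
--             j = i
--             while j < n and s[j] == 'O':
--                 j += 1
--             L = j - i
--             total += L * (L + 1) // 2
--             i = j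
--         else:
--             i += 1
--     return total
-- ===== Notes on version B (the rewrite author's own statement) =====
-- stated objective: alternative
-- what changed: B scans the string as maximal runs of 'O' and adds the closed-form triangular number L*(L+1)//2 per run, instead of A's per-character running streak-score accumulator.
import Mathlib
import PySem

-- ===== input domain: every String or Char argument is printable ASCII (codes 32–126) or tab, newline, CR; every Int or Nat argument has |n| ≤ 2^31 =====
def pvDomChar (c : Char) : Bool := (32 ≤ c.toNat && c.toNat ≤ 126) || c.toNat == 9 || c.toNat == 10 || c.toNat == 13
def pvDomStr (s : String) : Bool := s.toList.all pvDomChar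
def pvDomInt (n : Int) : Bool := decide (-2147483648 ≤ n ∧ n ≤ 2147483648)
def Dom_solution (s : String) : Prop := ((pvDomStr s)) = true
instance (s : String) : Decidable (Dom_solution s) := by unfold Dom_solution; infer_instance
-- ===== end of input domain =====

-- B scores each maximal run of 'O' with the closed-form triangular number instead of A's running streak accumulator; same O(n) cost.


-- ===== PORT A =====
-- fold state (answer, score), exactly A's loop
def solGoA (l : List Char) (st : Int × Int) : Int × Int :=
  l.foldl (fun p i => if i == 'O' then (p.1 + p.2 + 1, p.2 + 1) else (p.1, 0)) st

def solution (s : String) : Int := (solGoA s.toList (0, 0)).1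

-- ===== PORT B =====
-- B's outer while loop: at an 'O', measure the whole run (inner while = takeWhile),
-- add L*(L+1)//2, continue after the run (dropWhile); otherwise step one char.
def solGoB : List Char → Int
  | [] => 0
  | c :: t =>
      if c == 'O' then
        let L : Int := ((t.takeWhile (· == 'O')).length + 1 : Nat)
        L * (L + 1) / 2 + solGoB (t.dropWhile (· == 'O'))
      else solGoB t
termination_by l => l.length
decreasing_by
  · exact Nat.lt_succ_of_le (List.length_dropWhile_le _ _)
  · simp

def solution_alt (s : String) : Int := solGoB s.toList

-- ===== PRECONDITION & SPEC =====
def Spec_solution (s : String) (out : Int) : Prop := out = solution_alt s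
instance (s : String) (out : Int) : Decidable (Spec_solution s out) := by unfold Spec_solution; infer_instance

-- ===== CLAIM (what is proved, stated in full; the proofs are below) =====
def Claim_equal_solution : Prop := ∀ (s : String), Dom_solution s → Spec_solution s (solution s)

-- ===== LEMMAS AND PROOFS =====

-- length of the leading run of 'O'
def lead (l : List Char) : Nat := (l.takeWhile (· == 'O')).length

theorem tri_step (m : Nat) : (m+2)*(m+3)/2 = (m+2) + (m+1)*(m+2)/2 := by
  obtain ⟨a, ha⟩ := Nat.even_mul_succ_self (m+1)
  obtain ⟨b, hb⟩ := Nat.even_mul_succ_self (m+2)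
  have ha' : (m+1)*(m+2) = a + a := by rw [show m+2 = m+1+1 by ring]; exact ha
  have hb' : (m+2)*(m+3) = b + b := by rw [show m+3 = m+2+1 by ring]; exact hb
  have h3 : (m+2)*(m+3) = (m+1)*(m+2) + 2*(m+2) := by ring
  rw [ha', hb'] at h3 ⊢
  omega

theorem natDiv2 (x : Nat) : ((x : Int)) / 2 = ((x / 2 : Nat) : Int) := by
  rw [Int.natCast_div]; norm_num

theorem tri_step_int (n : Nat) :
    ((n:Int)+2)*((n:Int)+3)/2 = ((n:Int)+2) + ((n:Int)+1)*((n:Int)+2)/2 := by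
  have c1 : ((n:Int)+2)*((n:Int)+3) = (((n+2)*(n+3) : Nat) : Int) := by push_cast; ring
  have c2 : ((n:Int)+1)*((n:Int)+2) = (((n+1)*(n+2) : Nat) : Int) := by push_cast; ring
  rw [c1, c2, natDiv2, natDiv2, tri_step n]
  push_cast; ring

theorem solGoB_cons_ne (c : Char) (t : List Char) (hc : ¬ c = 'O') :
    solGoB (c :: t) = solGoB t := by
  have hb : (c == 'O') = false := by simp [hc]
  rw [solGoB]; simp [hb]

theorem solGoB_cons_O (t : List Char) :
    solGoB ('O' :: t) = (lead t : Int) + 1 + solGoB t := by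
  cases t with
  | nil => simp [solGoB, lead]
  | cons c u =>
    by_cases hc : c = 'O'
    · subst hc
      rw [solGoB, solGoB]
      have hT : List.takeWhile (· == 'O') ('O'::u) = 'O' :: List.takeWhile (· == 'O') u := by
        simp [List.takeWhile]
      have hD : List.dropWhile (· == 'O') ('O'::u) = List.dropWhile (· == 'O') u := by
        simp [List.dropWhile]
      simp only [hT, hD, beq_self_eq_true, if_true, List.length_cons, lead]
      set n := (List.takeWhile (· == 'O') u).length with hn
      have key := tri_step_int n
      have e1 : ((n+1+1 : Nat) : Int) = (n:Int)+2 := by push_cast; ring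
      have e2 : ((n+1 : Nat) : Int) = (n:Int)+1 := by push_cast; ring
      rw [e1, e2, show ((n:Int)+2)+1 = (n:Int)+3 by ring, show ((n:Int)+1)+1 = (n:Int)+2 by ring,
          key]
      ring
    · rw [solGoB]
      have hb : (c == 'O') = false := by simp [hc]
      rw [solGoB_cons_ne c u hc]
      simp only [List.takeWhile, List.dropWhile, hb, beq_self_eq_true, if_true, lead]
      rw [solGoB_cons_ne c u hc]
      norm_num

theorem goA_eq (l : List Char) : ∀ a k : Int,
    (solGoA l (a, k)).1 = a + k * (lead l : Nat) + solGoB l := by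
  induction l with
  | nil => intro a k; simp [solGoA, solGoB, lead]
  | cons c t ih =>
    intro a k
    by_cases hc : c = 'O'
    · subst hc
      have : solGoA ('O' :: t) (a, k) = solGoA t (a + k + 1, k + 1) := by
        simp [solGoA]
      rw [this, ih, solGoB_cons_O]
      have : lead ('O' :: t) = lead t + 1 := by
        simp [lead, List.takeWhile]
      rw [this]
      push_cast
      ring
    · have : solGoA (c :: t) (a, k) = solGoA t (a, 0) := by
        simp [solGoA, hc]
      rw [this, ih, solGoB_cons_ne c t hc]
      have hb : (c == 'O') = false := by simp [hc]
      have : lead (c :: t) = 0 := by simp [lead, List.takeWhile, hb]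
      rw [this]; push_cast; ring

-- ===== VERDICT (by name: the statement is the Claim_ definition above) =====
theorem solution_spec : Claim_equal_solution := by
  intro s _
  unfold Spec_solution solution solution_alt
  rw [goA_eq]
  simp
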